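-- pv_equiv track=rewrite | github.com/cravo123/LeetCode | Algorithms/0533 Lonely Pixel II.py | findBlackPixel
-- ===== SOURCE A (Python) =====
-- from typing import List
--
-- import collections
--
-- def findBlackPixel(picture: List[List[str]], N: int) -> int:
--     m, n = len(picture), len(picture[0]) if picture else 0
--
--     cols = collections.defaultdict(list)
--     rows = collections.defaultdict(list)
--
--     for i in range(m):
--         for j in range(n):
--             if picture[i][j] == 'B':
--                 cols[j].append(i)
--                 rows[i].append(j)
--
--     d = {}
--
--     for i, row in enumerate(picture):
--         d[i] = ''.join(row)
--
--     res = 0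
--     for j in range(n):
--         if len(cols[j]) == N:
--             if all(len(rows[i]) == N for i in cols[j]) and all(d[i] == d[cols[j][0]] for i in cols[j]):
--                 res += N
--     return res
-- ===== SOURCE B (Python) =====
-- def findBlackPixel(picture, N):
--     # One pass over the matrix with per-column accumulators (count of 'B's,
--     # joined string of the first 'B'-row, validity flag), then one scan over
--     # the columns.
--     if not picture:
--         return 0
--     n = len(picture[0])
--     colcnt = [0] * n
--     ok = [True] * n
--     first = [None] * n
--     for row in picture:
--         s = ''.join(row)
--         b = row[:n].count('B')
--         for j, cell in enumerate(row[:n]):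
--             if cell == 'B':
--                 colcnt[j] += 1
--                 if first[j] is None:
--                     first[j] = s
--                 if s != first[j] or b != N:
--                     ok[j] = False
--     return sum(N for c, o in zip(colcnt, ok) if c == N and o)
-- ===== Notes on version B (the rewrite author's own statement) =====
-- stated objective: alternative
-- what changed: B replaces A's build-two-dicts-then-rescan-each-column algorithm by a single pass over the matrix maintaining per-column accumulators (B-count, first B-row's joined string, validity flag) plus one final scan of the columns.
import Mathlib
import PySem

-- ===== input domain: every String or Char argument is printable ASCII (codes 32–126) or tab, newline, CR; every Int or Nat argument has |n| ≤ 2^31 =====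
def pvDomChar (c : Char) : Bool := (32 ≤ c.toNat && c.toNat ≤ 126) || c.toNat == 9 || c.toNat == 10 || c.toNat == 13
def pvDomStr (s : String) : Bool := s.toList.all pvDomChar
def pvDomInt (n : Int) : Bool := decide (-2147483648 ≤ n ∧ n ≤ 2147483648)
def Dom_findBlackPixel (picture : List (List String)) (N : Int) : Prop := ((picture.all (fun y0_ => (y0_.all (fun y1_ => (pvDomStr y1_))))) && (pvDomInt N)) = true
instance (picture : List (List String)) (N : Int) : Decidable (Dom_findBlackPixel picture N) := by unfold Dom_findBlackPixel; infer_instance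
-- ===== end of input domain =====

-- B changes the algorithm: a single pass with per-column accumulators instead of A's two dicts
-- plus a per-column re-scan; return values proved equal on Pre_ (A mutates nothing observable).

-- ===== PORT A =====
def findBlackPixel (picture : List (List String)) (N : Int) : Int :=
  let m : Int := PySem.List.len picture
  let n : Int := if picture = [] then 0 else PySem.List.len (PySem.List.pyGetD picture 0 [])
  let cr : PySem.Dict Int (List Int) × PySem.Dict Int (List Int) :=
    (PySem.List.pyRange 0 m 1).foldl (fun cr i =>
      (PySem.List.pyRange 0 n 1).foldl (fun (cr : PySem.Dict Int (List Int) × PySem.Dict Int (List Int)) j =>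
        if PySem.List.pyGetD (PySem.List.pyGetD picture i []) j "" = "B" then
          (cr.1.insert j (cr.1.getD j [] ++ [i]), cr.2.insert i (cr.2.getD i [] ++ [j]))
        else cr) cr)
      (PySem.Dict.empty, PySem.Dict.empty)
  let cols := cr.1
  let rows := cr.2
  let d : PySem.Dict Int String :=
    (PySem.List.enumerate picture 0).foldl (fun d p => d.insert p.1 (PySem.Str.join "" p.2)) PySem.Dict.empty
  (PySem.List.pyRange 0 n 1).foldl (fun res j =>
    if PySem.List.len (cols.getD j []) = N then
      if ((cols.getD j []).all fun i => PySem.List.len (rows.getD i []) == N) &&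
         ((cols.getD j []).all fun i => d.getD i "" == d.getD (PySem.List.pyGetD (cols.getD j []) 0 0) "") then
        res + N
      else res
    else res) 0

-- ===== PORT B =====
def findBlackPixel_alt (picture : List (List String)) (N : Int) : Int :=
  if picture = [] then 0
  else
    let n : Int := PySem.List.len (PySem.List.pyGetD picture 0 [])
    let st : List Int × List Bool × List (Option String) :=
      picture.foldl (fun st row =>
        let s : String := PySem.Str.join "" row
        let cells : List String := PySem.List.slice row none (some n)
        let b : Int := PySem.List.count cells "B"
        (PySem.List.enumerate cells 0).foldl (fun st p =>
          if p.2 = "B" then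
            let colcnt := PySem.List.pySetD st.1 p.1 (PySem.List.pyGetD st.1 p.1 0 + 1)
            let first := if PySem.List.pyGetD st.2.2 p.1 none = none
                         then PySem.List.pySetD st.2.2 p.1 (some s) else st.2.2
            let ok := if some s ≠ PySem.List.pyGetD first p.1 none ∨ b ≠ N
                      then PySem.List.pySetD st.2.1 p.1 false else st.2.1
            (colcnt, ok, first)
          else st) st)
        (List.replicate n.toNat 0, List.replicate n.toNat true, List.replicate n.toNat none)
    (st.1.zip st.2.1).foldl (fun res p => if p.1 = N ∧ p.2 = true then res + N else res) 0

-- ===== PRECONDITION & SPEC =====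
-- Pre_ excludes exactly the inputs where A raises IndexError: some row shorter than the first row.
def Pre_findBlackPixel (picture : List (List String)) (N : Int) : Prop :=
  ∀ r ∈ picture, (picture.headD []).length ≤ r.length
instance (picture : List (List String)) (N : Int) : Decidable (Pre_findBlackPixel picture N) := by
  unfold Pre_findBlackPixel; infer_instance
def pvWitness_findBlackPixel : List (List String) × Int := ([["B", "W"], ["W", "B"]], 1)

def Spec_findBlackPixel (picture : List (List String)) (N : Int) (out : Int) : Prop := out = findBlackPixel_alt picture N
instance (picture : List (List String)) (N : Int) (out : Int) : Decidable (Spec_findBlackPixel picture N out) := by unfold Spec_findBlackPixel; infer_instance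

-- ===== CLAIM (what is proved, stated in full; the proofs are below) =====
def Claim_equal_findBlackPixel : Prop := ∀ (picture : List (List String)) (N : Int), Dom_findBlackPixel picture N → Pre_findBlackPixel picture N → Spec_findBlackPixel picture N (findBlackPixel picture N)

-- ===== LEMMAS AND PROOFS =====

-- Reference model: picture-level descriptions of what both ports compute.
def pvRowL (picture : List (List String)) (i : Nat) : List String := picture.getD i []
def pvCellB (picture : List (List String)) (i j : Nat) : Bool := (pvRowL picture i).getD j "" == "B"
def pvColL (picture : List (List String)) (k j : Nat) : List Nat :=
  (List.range k).filter (fun i => pvCellB picture i j)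
def pvJoinR (picture : List (List String)) (i : Nat) : String := PySem.Str.join "" (pvRowL picture i)
def pvRowCnt (picture : List (List String)) (n i : Nat) : Nat :=
  ((List.range n).filter (fun j => pvCellB picture i j)).length
def pvGood (picture : List (List String)) (n : Nat) (N : Int) (k j : Nat) : Bool :=
  (pvColL picture k j).all (fun i => ((pvRowCnt picture n i : Int) == N) &&
    (pvJoinR picture i == pvJoinR picture ((pvColL picture k j).headD 0)))
def pvRef (picture : List (List String)) (N : Int) : Int :=
  (List.range (picture.headD []).length).foldl (fun res j =>
    if ((pvColL picture picture.length j).length : Int) == N &&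
       pvGood picture (picture.headD []).length N picture.length j
    then res + N else res) 0

def pvCast (n : Nat) : Int := (n : Int)

lemma pv_all_and {α : Type} (l : List α) (p q : α → Bool) :
    l.all (fun x => p x && q x) = (l.all p && l.all q) := by
  induction l with
  | nil => rfl
  | cons x xs ih =>
    simp only [List.all_cons, ih]
    cases p x <;> cases q x <;> simp

lemma pv_count_take (xs : List String) (n : Nat) :
    ((List.range n).filter (fun j => xs.getD j "" == "B")).length = (xs.take n).count "B" := by
  induction n with
  | zero => simp
  | succ n ih =>
    rw [List.range_succ, List.filter_append, List.take_succ]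
    simp only [List.length_append, ih, List.count_append]
    congr 1
    by_cases hn : n < xs.length
    · have h1 : xs[n]? = some xs[n] := List.getElem?_eq_getElem hn
      have h2 : xs.getD n "" = xs[n] := by simp [List.getD_eq_getElem?_getD, h1]
      by_cases hB : xs[n] = "B" <;> simp [List.filter_singleton, h1, h2, hB]
    · have h1 : xs[n]? = none := List.getElem?_eq_none (by omega)
      have h2 : xs.getD n "" = "" := by simp [List.getD_eq_getElem?_getD, h1]
      simp [List.filter_singleton, h1, h2]

lemma pv_getD_map_cast (l : List Nat) (h : l ≠ []) :
    (l.map pvCast).getD 0 0 = ((l.headD 0 : Nat) : Int) := by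
  cases l with
  | nil => simp at h
  | cons a l => simp [pvCast]

-- ===== A side =====

lemma pv_dlem (xs : List (List String)) (s : Int) (d0 : PySem.Dict Int String) (t : Int) :
    ((PySem.List.enumerate xs s).foldl (fun d p => d.insert p.1 (PySem.Str.join "" p.2)) d0).getD t "" =
      if s ≤ t ∧ t < s + xs.length then PySem.Str.join "" (xs.getD (t - s).toNat []) else d0.getD t "" := by
  induction xs generalizing s d0 with
  | nil =>
    simp only [PySem.List.enumerate_nil, List.foldl_nil, List.length_nil]
    rw [if_neg (by push_cast; omega)]
  | cons x xs ih =>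
    rw [PySem.List.enumerate_cons, List.foldl_cons, ih]
    by_cases h1 : s + 1 ≤ t ∧ t < s + 1 + xs.length
    · rw [if_pos h1, if_pos (by push_cast [List.length_cons] at h1 ⊢; omega)]
      have h2 : (t - s).toNat = (t - (s + 1)).toNat + 1 := by omega
      rw [h2]
      simp
    · rw [if_neg h1, PySem.Dict.getD_insert]
      by_cases h2 : t = s
      · subst h2
        rw [if_pos rfl, if_pos (by push_cast [List.length_cons]; omega)]
        simp
      · rw [if_neg h2, if_neg (by push_cast [List.length_cons] at h1 ⊢; omega)]

lemma pv_innerA (r : List String) (i : Int) (n : Int) :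
    ∀ (k : Nat) (a : Int) (cols rows : PySem.Dict Int (List Int)), (n - a).toNat = k →
    (∀ t : Int,
      ((PySem.List.pyRange a n 1).foldl (fun (cr : PySem.Dict Int (List Int) × PySem.Dict Int (List Int)) j =>
        if PySem.List.pyGetD r j "" = "B" then
          (cr.1.insert j (cr.1.getD j [] ++ [i]), cr.2.insert i (cr.2.getD i [] ++ [j]))
        else cr) (cols, rows)).1.getD t [] =
      cols.getD t [] ++ (if a ≤ t ∧ t < n ∧ PySem.List.pyGetD r t "" = "B" then [i] else [])) ∧
    (((PySem.List.pyRange a n 1).foldl (fun (cr : PySem.Dict Int (List Int) × PySem.Dict Int (List Int)) j =>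
        if PySem.List.pyGetD r j "" = "B" then
          (cr.1.insert j (cr.1.getD j [] ++ [i]), cr.2.insert i (cr.2.getD i [] ++ [j]))
        else cr) (cols, rows)).2.getD i [] =
      rows.getD i [] ++ (PySem.List.pyRange a n 1).filter (fun j => PySem.List.pyGetD r j "" == "B")) ∧
    (∀ t : Int, t ≠ i →
      ((PySem.List.pyRange a n 1).foldl (fun (cr : PySem.Dict Int (List Int) × PySem.Dict Int (List Int)) j =>
        if PySem.List.pyGetD r j "" = "B" then
          (cr.1.insert j (cr.1.getD j [] ++ [i]), cr.2.insert i (cr.2.getD i [] ++ [j]))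
        else cr) (cols, rows)).2.getD t [] = rows.getD t []) := by
  intro k
  induction k with
  | zero =>
    intro a cols rows hk
    rw [PySem.List.pyRange_one_eq_nil (by omega)]
    refine ⟨fun t => ?_, by simp, fun t ht => rfl⟩
    rw [List.foldl_nil, if_neg (by omega)]
    simp
  | succ k ih =>
    intro a cols rows hk
    have ha : a < n := by omega
    rw [PySem.List.pyRange_one_cons ha, List.foldl_cons]
    by_cases hB : PySem.List.pyGetD r a "" = "B"
    · rw [if_pos hB]
      obtain ⟨ih1, ih2, ih3⟩ := ih (a + 1)
        (cols.insert a (cols.getD a [] ++ [i])) (rows.insert i (rows.getD i [] ++ [a])) (by omega)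
      refine ⟨fun t => ?_, ?_, fun t ht => ?_⟩
      · rw [ih1 t, PySem.Dict.getD_insert]
        by_cases ht : t = a
        · subst ht
          rw [if_pos rfl, if_neg (by omega), if_pos ⟨le_refl t, ha, hB⟩]
          simp
        · rw [if_neg ht]
          by_cases hw : a + 1 ≤ t ∧ t < n ∧ PySem.List.pyGetD r t "" = "B"
          · rw [if_pos hw, if_pos ⟨by omega, hw.2⟩]
          · rw [if_neg hw, if_neg (by
              rintro ⟨h1, h2, h3⟩
              exact hw ⟨by omega, h2, h3⟩)]
      · rw [ih2, PySem.Dict.getD_insert, if_pos rfl, List.filter_cons]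
        simp [hB]
      · rw [ih3 t ht, PySem.Dict.getD_insert, if_neg ht]
    · rw [if_neg hB]
      obtain ⟨ih1, ih2, ih3⟩ := ih (a + 1) cols rows (by omega)
      refine ⟨fun t => ?_, ?_, fun t ht => ih3 t ht⟩
      · rw [ih1 t]
        by_cases hw : a + 1 ≤ t ∧ t < n ∧ PySem.List.pyGetD r t "" = "B"
        · rw [if_pos hw, if_pos ⟨by omega, hw.2⟩]
        · rw [if_neg hw, if_neg (by
            rintro ⟨h1, h2, h3⟩
            by_cases hta : t = a
            · exact hB (hta ▸ h3)
            · exact hw ⟨by omega, h2, h3⟩)]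
      · rw [ih2, List.filter_cons]
        simp [hB]

lemma pv_outerA (picture : List (List String)) (n : Int) :
    ∀ (k : Nat), k ≤ picture.length →
    (∀ j : Nat, (j : Int) < n →
      ((PySem.List.pyRange 0 (k : Int) 1).foldl (fun cr i =>
        (PySem.List.pyRange 0 n 1).foldl (fun (cr : PySem.Dict Int (List Int) × PySem.Dict Int (List Int)) j =>
          if PySem.List.pyGetD (PySem.List.pyGetD picture i []) j "" = "B" then
            (cr.1.insert j (cr.1.getD j [] ++ [i]), cr.2.insert i (cr.2.getD i [] ++ [j]))
          else cr) cr) (PySem.Dict.empty, PySem.Dict.empty)).1.getD (j : Int) [] =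
        (pvColL picture k j).map pvCast) ∧
    (∀ i : Nat, i < k →
      ((PySem.List.pyRange 0 (k : Int) 1).foldl (fun cr i =>
        (PySem.List.pyRange 0 n 1).foldl (fun (cr : PySem.Dict Int (List Int) × PySem.Dict Int (List Int)) j =>
          if PySem.List.pyGetD (PySem.List.pyGetD picture i []) j "" = "B" then
            (cr.1.insert j (cr.1.getD j [] ++ [i]), cr.2.insert i (cr.2.getD i [] ++ [j]))
          else cr) cr) (PySem.Dict.empty, PySem.Dict.empty)).2.getD (i : Int) [] =
        (PySem.List.pyRange 0 n 1).filter (fun j => PySem.List.pyGetD (pvRowL picture i) j "" == "B")) ∧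
    (∀ i : Nat, k ≤ i →
      ((PySem.List.pyRange 0 (k : Int) 1).foldl (fun cr i =>
        (PySem.List.pyRange 0 n 1).foldl (fun (cr : PySem.Dict Int (List Int) × PySem.Dict Int (List Int)) j =>
          if PySem.List.pyGetD (PySem.List.pyGetD picture i []) j "" = "B" then
            (cr.1.insert j (cr.1.getD j [] ++ [i]), cr.2.insert i (cr.2.getD i [] ++ [j]))
          else cr) cr) (PySem.Dict.empty, PySem.Dict.empty)).2.getD (i : Int) [] = []) := by
  intro k
  induction k with
  | zero =>
    intro hk
    rw [show ((0 : Nat) : Int) = 0 from rfl, PySem.List.pyRange_one_eq_nil le_rfl]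
    refine ⟨fun j hj => ?_, fun i hi => by omega, fun i hi => ?_⟩ <;>
      simp [pvColL, PySem.Dict.getD_empty]
  | succ k ih =>
    intro hk
    obtain ⟨ih1, ih2, ih3⟩ := ih (by omega)
    have hcast : ((k + 1 : Nat) : Int) = (k : Int) + 1 := by push_cast; ring
    rw [hcast, PySem.List.pyRange_one_succ_right (Int.natCast_nonneg k), List.foldl_append,
      List.foldl_cons, List.foldl_nil]
    obtain ⟨in1, in2, in3⟩ := pv_innerA (PySem.List.pyGetD picture (k : Int) []) (k : Int) n
      (n - 0).toNat 0
      ((PySem.List.pyRange 0 (k : Int) 1).foldl (fun cr i =>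
        (PySem.List.pyRange 0 n 1).foldl (fun (cr : PySem.Dict Int (List Int) × PySem.Dict Int (List Int)) j =>
          if PySem.List.pyGetD (PySem.List.pyGetD picture i []) j "" = "B" then
            (cr.1.insert j (cr.1.getD j [] ++ [i]), cr.2.insert i (cr.2.getD i [] ++ [j]))
          else cr) cr) (PySem.Dict.empty, PySem.Dict.empty)).1
      ((PySem.List.pyRange 0 (k : Int) 1).foldl (fun cr i =>
        (PySem.List.pyRange 0 n 1).foldl (fun (cr : PySem.Dict Int (List Int) × PySem.Dict Int (List Int)) j =>
          if PySem.List.pyGetD (PySem.List.pyGetD picture i []) j "" = "B" then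
            (cr.1.insert j (cr.1.getD j [] ++ [i]), cr.2.insert i (cr.2.getD i [] ++ [j]))
          else cr) cr) (PySem.Dict.empty, PySem.Dict.empty)).2
      rfl
    refine ⟨fun j hj => ?_, fun i hi => ?_, fun i hi => ?_⟩
    · rw [in1 (j : Int), ih1 j hj]
      have hcell : (PySem.List.pyGetD (PySem.List.pyGetD picture (k : Int) []) (j : Int) "" = "B")
          ↔ pvCellB picture k j = true := by
        simp [pvCellB, pvRowL]
      conv_rhs => rw [pvColL, List.range_succ, List.filter_append, ← pvColL]
      by_cases hc : pvCellB picture k j = true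
      · rw [if_pos ⟨Int.natCast_nonneg j, hj, hcell.mpr hc⟩]
        simp [hc, pvCast]
      · rw [if_neg (by rintro ⟨h1, h2, h3⟩; exact hc (hcell.mp h3))]
        simp [hc, pvCast]
    · by_cases hik : i < k
      · rw [in3 (i : Int) (by omega)]
        exact ih2 i hik
      · have hik' : i = k := by omega
        subst hik'
        rw [in2, ih3 i le_rfl]
        simp [pvRowL]
    · rw [in3 (i : Int) (by omega)]
      exact ih3 i (by omega)

lemma pv_all_congr {α : Type} (l : List α) (p q : α → Bool) (h : ∀ x ∈ l, p x = q x) :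
    l.all p = l.all q := by
  induction l with
  | nil => rfl
  | cons x xs ih =>
    simp only [List.all_cons]
    rw [h x (List.mem_cons_self), ih (fun y hy => h y (List.mem_cons_of_mem _ hy))]

lemma pv_rowjs_len (picture : List (List String)) (i nn : Nat) :
    (((List.range nn).map pvCast).filter
      (fun j => PySem.List.pyGetD (pvRowL picture i) j "" == "B")).length =
      pvRowCnt picture nn i := by
  rw [List.filter_map, List.length_map, pvRowCnt]
  congr 1
  apply List.filter_congr
  intro x hx
  simp [pvCellB, pvCast]

lemma pv_outerA_ex (picture : List (List String)) :
    ∃ CR : PySem.Dict Int (List Int) × PySem.Dict Int (List Int),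
    (PySem.List.pyRange 0 (picture.length : Int) 1).foldl (fun cr i =>
      (PySem.List.pyRange 0 ((picture.headD []).length : Int) 1).foldl
        (fun (cr : PySem.Dict Int (List Int) × PySem.Dict Int (List Int)) j =>
          if PySem.List.pyGetD (PySem.List.pyGetD picture i []) j "" = "B" then
            (cr.1.insert j (cr.1.getD j [] ++ [i]), cr.2.insert i (cr.2.getD i [] ++ [j]))
          else cr) cr) (PySem.Dict.empty, PySem.Dict.empty) = CR ∧
    (∀ j : Nat, j < (picture.headD []).length →
      CR.1.getD (j : Int) [] = (pvColL picture picture.length j).map pvCast) ∧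
    (∀ i : Nat, i < picture.length →
      CR.2.getD (i : Int) [] = (PySem.List.pyRange 0 ((picture.headD []).length : Int) 1).filter
        (fun j => PySem.List.pyGetD (pvRowL picture i) j "" == "B")) := by
  obtain ⟨h1, h2, h3⟩ := pv_outerA picture ((picture.headD []).length : Int) picture.length le_rfl
  exact ⟨_, rfl, fun j hj => h1 j (by exact_mod_cast hj), h2⟩

lemma pv_dlem_ex (picture : List (List String)) :
    ∃ DD : PySem.Dict Int String,
    (PySem.List.enumerate picture 0).foldl
      (fun d p => d.insert p.1 (PySem.Str.join "" p.2)) PySem.Dict.empty = DD ∧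
    ∀ i : Nat, i < picture.length → DD.getD (i : Int) "" = pvJoinR picture i := by
  refine ⟨_, rfl, fun i hi => ?_⟩
  rw [pv_dlem, if_pos (by push_cast; omega)]
  simp [pvJoinR, pvRowL]

lemma pv_A_eq_ref (picture : List (List String)) (N : Int) :
    findBlackPixel picture N = pvRef picture N := by
  by_cases hpic : picture = []
  · subst hpic; rfl
  · have hn : PySem.List.len (PySem.List.pyGetD picture 0 []) = ((picture.headD []).length : Int) := by
      cases picture with
      | nil => exact absurd rfl hpic
      | cons r t => simp [PySem.List.pyGetD_zero]
    simp only [findBlackPixel, if_neg hpic, hn, PySem.List.len_eq]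
    obtain ⟨CR, hCR, o1, o2⟩ := pv_outerA_ex picture
    obtain ⟨DD, hDD, hd⟩ := pv_dlem_ex picture
    rw [hCR, hDD]
    have hr : PySem.List.pyRange 0 ((picture.headD []).length : Int) 1 =
        (List.range (picture.headD []).length).map pvCast := by
      rw [PySem.List.pyRange_one]
      simp [pvCast]
    rw [hr, List.foldl_map]
    unfold pvRef
    apply PySem.List.foldl_congr_mem
    intro acc j hj
    have hjn : j < (picture.headD []).length := List.mem_range.mp hj
    simp only [pvCast]
    simp only [o1 j hjn, List.length_map]
    have hmem : ∀ i ∈ pvColL picture picture.length j, i < picture.length :=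
      fun i hi => List.mem_range.mp (List.mem_filter.mp hi).1
    have hall1 : ((pvColL picture picture.length j).map pvCast).all
        (fun i => ((CR.2.getD i []).length : Int) == N) =
        (pvColL picture picture.length j).all
          (fun i => ((pvRowCnt picture (picture.headD []).length i : Int) == N)) := by
      rw [List.all_map]
      apply pv_all_congr
      intro i hi
      simp only [Function.comp_apply, pvCast]
      rw [o2 i (hmem i hi), hr, pv_rowjs_len]
    have hheadmem : pvColL picture picture.length j ≠ [] →
        (pvColL picture picture.length j).headD 0 ∈ pvColL picture picture.length j := by
      intro h
      cases hcol : pvColL picture picture.length j with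
      | nil => exact absurd hcol h
      | cons a l => simp
    have hall2 : ((pvColL picture picture.length j).map pvCast).all
        (fun i => DD.getD i "" ==
          DD.getD (PySem.List.pyGetD ((pvColL picture picture.length j).map pvCast) 0 0) "") =
        (pvColL picture picture.length j).all
          (fun i => pvJoinR picture i == pvJoinR picture ((pvColL picture picture.length j).headD 0)) := by
      rw [List.all_map]
      apply pv_all_congr
      intro i hi
      have hnec : pvColL picture picture.length j ≠ [] := fun h => List.not_mem_nil (h ▸ hi)
      simp only [Function.comp_apply, pvCast]
      rw [PySem.List.pyGetD_zero, pv_getD_map_cast _ hnec, hd i (hmem i hi),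
        hd _ (hmem _ (hheadmem hnec))]
    rw [hall1, hall2]
    rw [show pvGood picture (picture.headD []).length N picture.length j =
        ((pvColL picture picture.length j).all
          (fun i => ((pvRowCnt picture (picture.headD []).length i : Int) == N)) &&
         (pvColL picture picture.length j).all
          (fun i => pvJoinR picture i == pvJoinR picture ((pvColL picture picture.length j).headD 0)))
      from by rw [pvGood, pv_all_and]]
    by_cases hlen : ((pvColL picture picture.length j).length : Int) = N
    · have hbeq : (((pvColL picture picture.length j).length : Int) == N) = true := by simp [hlen]
      rw [if_pos hlen, hbeq, Bool.true_and]
    · have hbeq : (((pvColL picture picture.length j).length : Int) == N) = false := by simp [hlen]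
      rw [if_neg hlen, hbeq, Bool.false_and]
      simp

-- ===== B side =====

lemma pv_set_map_range {α : Type} (F : Nat → α) (nn t : Nat) (v : α) :
    ((List.range nn).map F).set t v = (List.range nn).map (fun u => if u = t ∧ t < nn then v else F u) := by
  apply List.ext_getElem
  · simp
  · intro u h1 h2
    have hlen : u < nn := by simpa using h1
    simp only [List.getElem_set, List.getElem_map, List.getElem_range]
    by_cases hu : u = t
    · subst hu
      rw [if_pos rfl, if_pos ⟨rfl, hlen⟩]
    · rw [if_neg (fun h => hu h.symm), if_neg (fun h => hu h.1)]

lemma pv_getD_map_range {α : Type} (F : Nat → α) (nn t : Nat) (d : α) :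
    ((List.range nn).map F).getD t d = if t < nn then F t else d := by
  by_cases ht : t < nn
  · rw [if_pos ht, List.getD_eq_getElem?_getD]
    simp [ht]
  · rw [if_neg ht, List.getD_eq_getElem?_getD, List.getElem?_eq_none (by simp; omega)]
    rfl

abbrev pvW (cells : List String) (j0 t : Nat) : Prop :=
  j0 ≤ t ∧ t - j0 < cells.length ∧ cells.getD (t - j0) "" = "B"

def pvStepB (s : String) (b N : Int) (st : List Int × List Bool × List (Option String))
    (p : Int × String) : List Int × List Bool × List (Option String) :=
  if p.2 = "B" then
    let colcnt := PySem.List.pySetD st.1 p.1 (PySem.List.pyGetD st.1 p.1 0 + 1)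
    let first := if PySem.List.pyGetD st.2.2 p.1 none = none
                 then PySem.List.pySetD st.2.2 p.1 (some s) else st.2.2
    let ok := if some s ≠ PySem.List.pyGetD first p.1 none ∨ b ≠ N
              then PySem.List.pySetD st.2.1 p.1 false else st.2.1
    (colcnt, ok, first)
  else st

lemma pv_stepB_def (s : String) (b N : Int) :
    (fun (st : List Int × List Bool × List (Option String)) (p : Int × String) =>
      if p.2 = "B" then
        (PySem.List.pySetD st.1 p.1 (PySem.List.pyGetD st.1 p.1 0 + 1),
         if some s ≠ PySem.List.pyGetD (if PySem.List.pyGetD st.2.2 p.1 none = none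
             then PySem.List.pySetD st.2.2 p.1 (some s) else st.2.2) p.1 none ∨ b ≠ N
         then PySem.List.pySetD st.2.1 p.1 false else st.2.1,
         if PySem.List.pyGetD st.2.2 p.1 none = none
             then PySem.List.pySetD st.2.2 p.1 (some s) else st.2.2)
      else st) = pvStepB s b N := rfl

lemma pv_stepB_maps (s : String) (b N : Int) (nn j0 : Nat) (hj0 : j0 < nn) (c : String)
    (Fc : Nat → Int) (Fo : Nat → Bool) (Ff : Nat → Option String) :
    pvStepB s b N ((List.range nn).map Fc, (List.range nn).map Fo, (List.range nn).map Ff)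
      ((j0 : Int), c) =
    ((List.range nn).map (fun u => if u = j0 ∧ c = "B" then Fc u + 1 else Fc u),
     (List.range nn).map (fun u => if u = j0 ∧ c = "B" then
        (if s ≠ (Ff j0).getD s ∨ b ≠ N then false else Fo u) else Fo u),
     (List.range nn).map (fun u => if u = j0 ∧ c = "B" then some ((Ff j0).getD s) else Ff u)) := by
  unfold pvStepB
  dsimp only
  by_cases hc : c = "B"
  case neg =>
    rw [if_neg hc]
    simp only [Prod.mk.injEq]
    refine ⟨?_, ?_, ?_⟩ <;>
    · symm
      apply List.map_congr_left
      intro u hu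
      rw [if_neg (fun h => hc h.2)]
  case pos =>
    rw [if_pos hc]
    have hgc : PySem.List.pyGetD ((List.range nn).map Fc) ((j0 : Nat) : Int) 0 = Fc j0 := by
      rw [PySem.List.pyGetD_natCast, pv_getD_map_range, if_pos hj0]
    have hgf : PySem.List.pyGetD ((List.range nn).map Ff) ((j0 : Nat) : Int) none = Ff j0 := by
      rw [PySem.List.pyGetD_natCast, pv_getD_map_range, if_pos hj0]
    rw [hgc]
    have hsetc : PySem.List.pySetD ((List.range nn).map Fc) ((j0 : Nat) : Int) (Fc j0 + 1) =
        (List.range nn).map (fun u => if u = j0 ∧ c = "B" then Fc u + 1 else Fc u) := by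
      rw [PySem.List.pySetD_natCast, pv_set_map_range]
      apply List.map_congr_left
      intro u hu
      by_cases hu0 : u = j0
      · subst hu0
        rw [if_pos ⟨rfl, hj0⟩, if_pos ⟨rfl, hc⟩]
      · rw [if_neg (fun h => hu0 h.1), if_neg (fun h => hu0 h.1)]
    have hfirst : (if PySem.List.pyGetD ((List.range nn).map Ff) ((j0 : Nat) : Int) none = none
        then PySem.List.pySetD ((List.range nn).map Ff) ((j0 : Nat) : Int) (some s)
        else (List.range nn).map Ff) =
        (List.range nn).map (fun u => if u = j0 ∧ c = "B" then some ((Ff j0).getD s) else Ff u) := by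
      rw [hgf]
      by_cases hff : Ff j0 = none
      · rw [if_pos hff, PySem.List.pySetD_natCast, pv_set_map_range]
        apply List.map_congr_left
        intro u hu
        by_cases hu0 : u = j0
        · subst hu0
          rw [if_pos ⟨rfl, hj0⟩, if_pos ⟨rfl, hc⟩, hff]
          rfl
        · rw [if_neg (fun h => hu0 h.1), if_neg (fun h => hu0 h.1)]
      · rw [if_neg hff]
        symm
        apply List.map_congr_left
        intro u hu
        by_cases hu0 : u = j0
        · subst hu0
          rw [if_pos ⟨rfl, hc⟩]
          cases hFf : Ff u with
          | none => exact absurd hFf hff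
          | some v => rfl
        · rw [if_neg (fun h => hu0 h.1)]
    rw [hsetc, hfirst]
    have hgf2 : PySem.List.pyGetD ((List.range nn).map
        (fun u => if u = j0 ∧ c = "B" then some ((Ff j0).getD s) else Ff u)) ((j0 : Nat) : Int) none =
        some ((Ff j0).getD s) := by
      rw [PySem.List.pyGetD_natCast, pv_getD_map_range, if_pos hj0, if_pos ⟨rfl, hc⟩]
    rw [hgf2]
    have hok : (if some s ≠ some ((Ff j0).getD s) ∨ b ≠ N
        then PySem.List.pySetD ((List.range nn).map Fo) ((j0 : Nat) : Int) false
        else (List.range nn).map Fo) =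
        (List.range nn).map (fun u => if u = j0 ∧ c = "B" then
          (if s ≠ (Ff j0).getD s ∨ b ≠ N then false else Fo u) else Fo u) := by
      by_cases hcond : s ≠ (Ff j0).getD s ∨ b ≠ N
      · rw [if_pos (by
            rcases hcond with h | h
            · exact Or.inl (fun he => h (Option.some_injective _ he))
            · exact Or.inr h),
          PySem.List.pySetD_natCast, pv_set_map_range]
        apply List.map_congr_left
        intro u hu
        by_cases hu0 : u = j0
        · subst hu0
          rw [if_pos ⟨rfl, hj0⟩, if_pos ⟨rfl, hc⟩, if_pos hcond]
        · rw [if_neg (fun h => hu0 h.1), if_neg (fun h => hu0 h.1)]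
      · rw [if_neg (by
            rintro (h | h)
            · exact hcond (Or.inl (fun he => h (congrArg some he)))
            · exact hcond (Or.inr h))]
        symm
        apply List.map_congr_left
        intro u hu
        by_cases hu0 : u = j0
        · subst hu0
          rw [if_pos ⟨rfl, hc⟩, if_neg hcond]
        · rw [if_neg (fun h => hu0 h.1)]
    rw [hok]

lemma pv_innerB (s : String) (b N : Int) (nn : Nat) :
    ∀ (cells : List String) (j0 : Nat) (Fc : Nat → Int) (Fo : Nat → Bool) (Ff : Nat → Option String),
    j0 + cells.length ≤ nn →
    ((PySem.List.enumerate cells (j0 : Int)).foldl (pvStepB s b N)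
      ((List.range nn).map Fc, (List.range nn).map Fo, (List.range nn).map Ff)) =
    ((List.range nn).map (fun t => if pvW cells j0 t then Fc t + 1 else Fc t),
     (List.range nn).map (fun t => if pvW cells j0 t then
         (if s ≠ (Ff t).getD s ∨ b ≠ N then false else Fo t) else Fo t),
     (List.range nn).map (fun t => if pvW cells j0 t then some ((Ff t).getD s) else Ff t)) := by
  intro cells
  induction cells with
  | nil =>
    intro j0 Fc Fo Ff hle
    rw [PySem.List.enumerate_nil, List.foldl_nil]
    simp only [Prod.mk.injEq]
    refine ⟨?_, ?_, ?_⟩ <;>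
    · symm
      apply List.map_congr_left
      intro u hu
      rw [if_neg (by rintro ⟨h1, h2, h3⟩; simp at h2)]
  | cons c cs ih =>
    intro j0 Fc Fo Ff hle
    have hj0 : j0 < nn := by
      simp only [List.length_cons] at hle
      omega
    rw [PySem.List.enumerate_cons, List.foldl_cons, pv_stepB_maps s b N nn j0 hj0 c Fc Fo Ff,
      show ((j0 : Int) + 1) = ((j0 + 1 : Nat) : Int) from by push_cast; ring,
      ih (j0 + 1) _ _ _ (by simp only [List.length_cons] at hle; omega)]
    have hW : ∀ t : Nat, t ≠ j0 → (pvW cs (j0 + 1) t ↔ pvW (c :: cs) j0 t) := by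
      intro t ht
      unfold pvW
      constructor
      · rintro ⟨h1, h2, h3⟩
        refine ⟨by omega, by simp only [List.length_cons]; omega, ?_⟩
        rw [show t - j0 = (t - (j0 + 1)) + 1 from by omega, List.getD_cons_succ]
        exact h3
      · rintro ⟨h1, h2, h3⟩
        refine ⟨by omega, by simp only [List.length_cons] at h2; omega, ?_⟩
        rw [show t - j0 = (t - (j0 + 1)) + 1 from by omega, List.getD_cons_succ] at h3
        exact h3
    have hWj0 : pvW (c :: cs) j0 j0 ↔ c = "B" := by
      unfold pvW
      simp
    have hWj0' : ¬ pvW cs (j0 + 1) j0 := by rintro ⟨h1, h2, h3⟩; omega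
    simp only [Prod.mk.injEq]
    refine ⟨?_, ?_, ?_⟩ <;>
    · apply List.map_congr_left
      intro u hu
      by_cases hu0 : u = j0
      · subst hu0
        rw [if_neg hWj0']
        by_cases hcB : c = "B"
        · rw [if_pos ⟨rfl, hcB⟩, if_pos (hWj0.mpr hcB)]
        · rw [if_neg (fun h => hcB h.2), if_neg (fun h => hcB (hWj0.mp h))]
      · have e1 : (u = j0 ∧ c = "B") = False := eq_false (fun h => hu0 h.1)
        simp only [e1, if_false]
        exact if_congr (hW u hu0) rfl rfl

lemma pv_W_iff (r : List String) (nn u : Nat) (hun : u < nn) :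
    pvW (r.take nn) 0 u ↔ r.getD u "" = "B" := by
  unfold pvW
  simp only [Nat.sub_zero, Nat.zero_le, true_and, List.length_take]
  constructor
  · rintro ⟨h2, h3⟩
    have hur : u < r.length := by omega
    rw [List.getD_eq_getElem?_getD, List.getElem?_take] at h3
    rw [if_pos hun] at h3
    rwa [List.getD_eq_getElem?_getD]
  · intro h3
    have hur : u < r.length := by
      by_contra hc
      rw [List.getD_eq_getElem?_getD, List.getElem?_eq_none (by omega)] at h3
      simp at h3
    refine ⟨by omega, ?_⟩
    rw [List.getD_eq_getElem?_getD, List.getElem?_take, if_pos hun]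
    rwa [List.getD_eq_getElem?_getD] at h3

lemma pv_outerB (picture : List (List String)) (N : Int) :
    ∀ (kk k : Nat), picture.length - k = kk → k ≤ picture.length →
    ((picture.drop k).foldl (fun st row =>
        (PySem.List.enumerate
          (PySem.List.slice row none (some ((picture.headD []).length : Int))) 0).foldl
          (pvStepB (PySem.Str.join "" row)
            (PySem.List.count
              (PySem.List.slice row none (some ((picture.headD []).length : Int))) "B") N) st)
      ((List.range (picture.headD []).length).map (fun j => ((pvColL picture k j).length : Int)),
       (List.range (picture.headD []).length).map
         (fun j => pvGood picture (picture.headD []).length N k j),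
       (List.range (picture.headD []).length).map
         (fun j => (pvColL picture k j).head?.map (pvJoinR picture)))) =
    ((List.range (picture.headD []).length).map
      (fun j => ((pvColL picture picture.length j).length : Int)),
     (List.range (picture.headD []).length).map
       (fun j => pvGood picture (picture.headD []).length N picture.length j),
     (List.range (picture.headD []).length).map
       (fun j => (pvColL picture picture.length j).head?.map (pvJoinR picture))) := by
  intro kk
  induction kk with
  | zero =>
    intro k hk hkle
    have hkL : k = picture.length := by omega
    subst hkL
    rw [List.drop_length, List.foldl_nil]
  | succ kk ih =>
    intro k hk hkle
    have hkL : k < picture.length := by omega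
    rw [List.drop_eq_getElem_cons hkL, List.foldl_cons]
    have hrowL : pvRowL picture k = picture[k] := by
      rw [pvRowL]
      simp [List.getD_eq_getElem?_getD, List.getElem?_eq_getElem hkL]
    have hcells : PySem.List.slice picture[k] none (some ((picture.headD []).length : Int)) =
        picture[k].take (picture.headD []).length := PySem.List.slice_to_natCast _ _
    rw [hcells]
    have hfilter : (List.range (picture.headD []).length).filter
        (fun j => picture[k].getD j "" == "B") =
        (List.range (picture.headD []).length).filter (fun j => pvCellB picture k j) := by
      apply List.filter_congr
      intro x hx
      rw [pvCellB, hrowL]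
    have hb : PySem.List.count (picture[k].take (picture.headD []).length) "B" =
        ((pvRowCnt picture (picture.headD []).length k : Nat) : Int) := by
      rw [PySem.List.count_eq, ← pv_count_take, hfilter, pvRowCnt]
    rw [hb]
    have hs : PySem.Str.join "" picture[k] = pvJoinR picture k := by
      rw [pvJoinR, hrowL]
    rw [hs]
    have hinner := pv_innerB (pvJoinR picture k)
      ((pvRowCnt picture (picture.headD []).length k : Nat) : Int)
      N (picture.headD []).length (picture[k].take (picture.headD []).length) 0
      (fun j => ((pvColL picture k j).length : Int))
      (fun j => pvGood picture (picture.headD []).length N k j)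
      (fun j => (pvColL picture k j).head?.map (pvJoinR picture))
      (by simp [List.length_take])
    simp only [Nat.cast_zero] at hinner
    rw [hinner]
    have hWc : ∀ u, u < (picture.headD []).length →
        (pvW (picture[k].take (picture.headD []).length) 0 u ↔ pvCellB picture k u = true) := by
      intro u hun
      rw [pv_W_iff _ _ _ hun]
      unfold pvCellB
      rw [hrowL, beq_iff_eq]
    have hsucc : ∀ u, pvColL picture (k + 1) u =
        pvColL picture k u ++ (if pvCellB picture k u then [k] else []) := by
      intro u
      rw [pvColL, List.range_succ, List.filter_append, ← pvColL, List.filter_singleton]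
      cases hpc : pvCellB picture k u <;> simp
    have hstate : ((List.range (picture.headD []).length).map
        (fun t => if pvW (picture[k].take (picture.headD []).length) 0 t
          then ((pvColL picture k t).length : Int) + 1 else ((pvColL picture k t).length : Int)),
       (List.range (picture.headD []).length).map
        (fun t => if pvW (picture[k].take (picture.headD []).length) 0 t
          then (if pvJoinR picture k ≠ (((pvColL picture k t).head?.map (pvJoinR picture)).getD (pvJoinR picture k)) ∨
                  ((pvRowCnt picture (picture.headD []).length k : Nat) : Int) ≠ N
                then false else pvGood picture (picture.headD []).length N k t)
          else pvGood picture (picture.headD []).length N k t),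
       (List.range (picture.headD []).length).map
        (fun t => if pvW (picture[k].take (picture.headD []).length) 0 t
          then some (((pvColL picture k t).head?.map (pvJoinR picture)).getD (pvJoinR picture k))
          else (pvColL picture k t).head?.map (pvJoinR picture))) =
      ((List.range (picture.headD []).length).map
        (fun j => ((pvColL picture (k + 1) j).length : Int)),
       (List.range (picture.headD []).length).map
         (fun j => pvGood picture (picture.headD []).length N (k + 1) j),
       (List.range (picture.headD []).length).map
         (fun j => (pvColL picture (k + 1) j).head?.map (pvJoinR picture))) := by
      simp only [Prod.mk.injEq]
      refine ⟨?_, ?_, ?_⟩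
      · apply List.map_congr_left
        intro u hu
        have hun : u < (picture.headD []).length := List.mem_range.mp hu
        rw [hsucc u]
        by_cases hc : pvCellB picture k u = true
        · rw [if_pos hc, if_pos ((hWc u hun).mpr hc)]
          simp only [List.length_append, List.length_cons, List.length_nil]
          omega
        · rw [if_neg hc, if_neg (fun h => hc ((hWc u hun).mp h)), List.append_nil]
      · apply List.map_congr_left
        intro u hu
        have hun : u < (picture.headD []).length := List.mem_range.mp hu
        conv_rhs => rw [pvGood, hsucc u]
        by_cases hc : pvCellB picture k u = true
        · rw [if_pos ((hWc u hun).mpr hc)]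
          conv_rhs => rw [if_pos hc]
          rw [pvGood]
          cases hcol : pvColL picture k u with
          | nil =>
            by_cases hbN : ((pvRowCnt picture (picture.head?.getD []).length k : Nat) : Int) = N
            · rw [if_neg (by simp [hbN])]
              simp [hbN]
            · rw [if_pos (Or.inr (by simpa using hbN))]
              simp [hbN]
          | cons c0 cl =>
            simp only [List.cons_append, List.head?_cons, Option.map_some, Option.getD_some,
              List.headD_cons, List.all_append, List.all_cons, List.all_nil, Bool.and_true]
            by_cases h1 : pvJoinR picture k = pvJoinR picture c0
            · by_cases h2 : ((pvRowCnt picture (picture.head?.getD []).length k : Nat) : Int) = N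
              · rw [if_neg (by simp [h1, h2])]
                simp [h1, h2]
              · rw [if_pos (Or.inr (by simpa using h2))]
                simp [h2]
            · rw [if_pos (Or.inl h1)]
              simp [h1]
        · rw [if_neg (fun h => hc ((hWc u hun).mp h))]
          conv_rhs => rw [if_neg hc]
          rw [List.append_nil, pvGood]
      · apply List.map_congr_left
        intro u hu
        have hun : u < (picture.headD []).length := List.mem_range.mp hu
        rw [hsucc u]
        by_cases hc : pvCellB picture k u = true
        · rw [if_pos hc, if_pos ((hWc u hun).mpr hc)]
          cases hcol : pvColL picture k u with
          | nil => simp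
          | cons c0 cl => simp
        · rw [if_neg hc, if_neg (fun h => hc ((hWc u hun).mp h)), List.append_nil]
    rw [hstate]
    exact ih (k + 1) (by omega) (by omega)

lemma pv_B_eq_ref (picture : List (List String)) (N : Int) :
    findBlackPixel_alt picture N = pvRef picture N := by
  by_cases hpic : picture = []
  · subst hpic; rfl
  · have hn : PySem.List.len (PySem.List.pyGetD picture 0 []) = ((picture.headD []).length : Int) := by
      cases picture with
      | nil => exact absurd rfl hpic
      | cons r t => simp [PySem.List.pyGetD_zero]
    simp only [findBlackPixel_alt, if_neg hpic, hn, pv_stepB_def, Int.toNat_natCast]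
    have hini1 : List.replicate (picture.headD []).length (0 : Int) =
        (List.range (picture.headD []).length).map (fun j => ((pvColL picture 0 j).length : Int)) := by
      rw [List.map_congr_left (g := fun _ => (0 : Int)) (by intro j hj; rw [pvColL]; simp)]
      simp [List.map_const']
    have hini2 : List.replicate (picture.headD []).length true =
        (List.range (picture.headD []).length).map
          (fun j => pvGood picture (picture.headD []).length N 0 j) := by
      rw [List.map_congr_left (g := fun _ => true) (by intro j hj; rw [pvGood, pvColL]; simp)]
      simp [List.map_const']
    have hini3 : List.replicate (picture.headD []).length (none : Option String) =
        (List.range (picture.headD []).length).map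
          (fun j => (pvColL picture 0 j).head?.map (pvJoinR picture)) := by
      rw [List.map_congr_left (g := fun _ => (none : Option String)) (by intro j hj; rw [pvColL]; simp)]
      simp [List.map_const']
    rw [hini1, hini2, hini3]
    have hdrop := pv_outerB picture N picture.length 0 rfl (Nat.zero_le _)
    rw [List.drop_zero] at hdrop
    rw [hdrop, List.zip_map', List.foldl_map]
    unfold pvRef
    apply PySem.List.foldl_congr_mem
    intro acc j hj
    by_cases h1 : ((pvColL picture picture.length j).length : Int) = N <;>
      by_cases h2 : pvGood picture (picture.headD []).length N picture.length j = true <;>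
        simp [h1, h2]

-- ===== VERDICT (by name: the statement is the Claim_ definition above) =====
theorem findBlackPixel_spec : Claim_equal_findBlackPixel := by
  intro picture N _ _
  unfold Spec_findBlackPixel
  rw [pv_A_eq_ref, pv_B_eq_ref]
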